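-- pv_equiv track=rewrite | github.com/rdlwicked/Evo-SOTA.io | data/DataProcess.py | split_libero_plus_by_category
-- ===== SOURCE A (Python) =====
-- from typing import Optional, Dict, Any, List
--
-- def split_libero_plus_by_category(data_list: List[Dict]) -> Dict[str, List[Dict]]:
--     """
--     将 LIBERO Plus 数据按开源、标准测试和 mix-sft 情况分类
--     返回六个列表：
--     - standard_opensource: 标准测试 + 开源 + 非 mix-sft
--     - standard_opensource_mixsft: 标准测试 + 开源 + mix-sft
--     - standard_closed: 标准测试 + 未开源 + 非 mix-sft
--     - standard_closed_mixsft: 标准测试 + 未开源 + mix-sft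
--     - non_standard: 非标准测试 + 非 mix-sft（附录）
--     - non_standard_mixsft: 非标准测试 + mix-sft（附录）
--     """
--     standard_opensource = []
--     standard_opensource_mixsft = []
--     standard_closed = []
--     standard_closed_mixsft = []
--     non_standard = []
--     non_standard_mixsft = []
--
--     for item in data_list:
--         is_standard = item.get('is_standard', False)
--         is_opensource = item.get('is_opensource', False)
--         is_mixsft = item.get('is_mixsft', False)
--
--         if not is_standard:
--             if is_mixsft:
--                 non_standard_mixsft.append(item)
--             else:
--                 non_standard.append(item)
--         elif is_opensource:
--             if is_mixsft:
--                 standard_opensource_mixsft.append(item)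
--             else:
--                 standard_opensource.append(item)
--         else:
--             if is_mixsft:
--                 standard_closed_mixsft.append(item)
--             else:
--                 standard_closed.append(item)
--
--     return {
--         'standard_opensource': standard_opensource,
--         'standard_opensource_mixsft': standard_opensource_mixsft,
--         'standard_closed': standard_closed,
--         'standard_closed_mixsft': standard_closed_mixsft,
--         'non_standard': non_standard,
--         'non_standard_mixsft': non_standard_mixsft
--     }
-- ===== SOURCE B (Python) =====
-- from typing import Dict, List
--
-- def split_libero_plus_by_category(data_list: List[Dict]) -> Dict[str, List[Dict]]:
--     # Staged filtering: one full filter pass per bucket instead of a single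
--     # pass with six accumulators.  The selector normalizes the three flags,
--     # folding opensource to False when the item is not standard.
--     def key(item):
--         s = bool(item.get('is_standard', False))
--         return (s,
--                 s and bool(item.get('is_opensource', False)),
--                 bool(item.get('is_mixsft', False)))
--     return {
--         'standard_opensource':        [it for it in data_list if key(it) == (True, True, False)],
--         'standard_opensource_mixsft': [it for it in data_list if key(it) == (True, True, True)],
--         'standard_closed':            [it for it in data_list if key(it) == (True, False, False)],
--         'standard_closed_mixsft':     [it for it in data_list if key(it) == (True, False, True)],
--         'non_standard':               [it for it in data_list if key(it) == (False, False, False)],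
--         'non_standard_mixsft':        [it for it in data_list if key(it) == (False, False, True)],
--     }
-- ===== Notes on version B (the rewrite author's own statement) =====
-- stated objective: alternative
-- what changed: Replaces the single pass with six named accumulator lists and nested if/elif branching by six independent filter passes, each selecting one bucket via a normalized flag-triple predicate.
import Mathlib
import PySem

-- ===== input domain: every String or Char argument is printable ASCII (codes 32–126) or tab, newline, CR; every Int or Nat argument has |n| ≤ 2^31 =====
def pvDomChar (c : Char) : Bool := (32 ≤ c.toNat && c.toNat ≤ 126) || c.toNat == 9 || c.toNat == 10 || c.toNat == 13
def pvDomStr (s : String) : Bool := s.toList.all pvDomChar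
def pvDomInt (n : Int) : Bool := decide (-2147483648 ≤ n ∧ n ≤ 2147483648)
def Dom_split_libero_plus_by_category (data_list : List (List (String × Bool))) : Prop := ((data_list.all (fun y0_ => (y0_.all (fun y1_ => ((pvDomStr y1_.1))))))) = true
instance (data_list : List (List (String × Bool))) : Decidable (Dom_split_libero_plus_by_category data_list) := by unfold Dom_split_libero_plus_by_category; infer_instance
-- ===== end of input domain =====

-- B replaces the one-pass six-accumulator loop by six independent filter passes; alternative structure, same cost class.

-- ===== PORT A =====
-- the for-loop of A, with the six accumulator lists as loop state; at the end the dict literal is assembled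
def splitLoopA (l : List (List (String × Bool)))
    (so som sc scm ns nsm : List (List (String × Bool))) :
    List (String × List (List (String × Bool))) :=
  match l with
  | [] =>
    [("standard_opensource", so), ("standard_opensource_mixsft", som),
     ("standard_closed", sc), ("standard_closed_mixsft", scm),
     ("non_standard", ns), ("non_standard_mixsft", nsm)]
  | item :: rest =>
    let is_standard := (PySem.Dict.mk item).getD "is_standard" false
    let is_opensource := (PySem.Dict.mk item).getD "is_opensource" false
    let is_mixsft := (PySem.Dict.mk item).getD "is_mixsft" false
    if !is_standard then
      if is_mixsft then splitLoopA rest so som sc scm ns (nsm ++ [item])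
      else splitLoopA rest so som sc scm (ns ++ [item]) nsm
    else if is_opensource then
      if is_mixsft then splitLoopA rest so (som ++ [item]) sc scm ns nsm
      else splitLoopA rest (so ++ [item]) som sc scm ns nsm
    else
      if is_mixsft then splitLoopA rest so som sc (scm ++ [item]) ns nsm
      else splitLoopA rest so som (sc ++ [item]) scm ns nsm

def split_libero_plus_by_category (data_list : List (List (String × Bool))) :
    List (String × List (List (String × Bool))) :=
  splitLoopA data_list [] [] [] [] [] []

-- ===== PORT B =====
-- B's selector: normalized flag triple (opensource folded to false when not standard)
def pvKey (item : List (String × Bool)) : Bool × Bool × Bool :=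
  let s := (PySem.Dict.mk item).getD "is_standard" false
  (s, s && (PySem.Dict.mk item).getD "is_opensource" false,
   (PySem.Dict.mk item).getD "is_mixsft" false)

def split_libero_plus_by_category_alt (data_list : List (List (String × Bool))) :
    List (String × List (List (String × Bool))) :=
  [("standard_opensource",        data_list.filter (fun it => pvKey it == (true, true, false))),
   ("standard_opensource_mixsft", data_list.filter (fun it => pvKey it == (true, true, true))),
   ("standard_closed",            data_list.filter (fun it => pvKey it == (true, false, false))),
   ("standard_closed_mixsft",     data_list.filter (fun it => pvKey it == (true, false, true))),
   ("non_standard",               data_list.filter (fun it => pvKey it == (false, false, false))),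
   ("non_standard_mixsft",        data_list.filter (fun it => pvKey it == (false, false, true)))]

-- ===== PRECONDITION & SPEC =====
def Spec_split_libero_plus_by_category (data_list : List (List (String × Bool))) (out : List (String × List (List (String × Bool)))) : Prop := out = split_libero_plus_by_category_alt data_list
instance (data_list : List (List (String × Bool))) (out : List (String × List (List (String × Bool)))) : Decidable (Spec_split_libero_plus_by_category data_list out) := by unfold Spec_split_libero_plus_by_category; infer_instance

-- ===== CLAIM (what is proved, stated in full; the proofs are below) =====
def Claim_equal_split_libero_plus_by_category : Prop := ∀ (data_list : List (List (String × Bool))), Dom_split_libero_plus_by_category data_list → Spec_split_libero_plus_by_category data_list (split_libero_plus_by_category data_list)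

-- ===== LEMMAS AND PROOFS =====

-- invariant: A's loop result is the six accumulators each extended by the matching filter of the rest
theorem splitLoop_eq (l : List (List (String × Bool)))
    (so som sc scm ns nsm : List (List (String × Bool))) :
    splitLoopA l so som sc scm ns nsm =
      [("standard_opensource",        so  ++ l.filter (fun it => pvKey it == (true, true, false))),
       ("standard_opensource_mixsft", som ++ l.filter (fun it => pvKey it == (true, true, true))),
       ("standard_closed",            sc  ++ l.filter (fun it => pvKey it == (true, false, false))),
       ("standard_closed_mixsft",     scm ++ l.filter (fun it => pvKey it == (true, false, true))),
       ("non_standard",               ns  ++ l.filter (fun it => pvKey it == (false, false, false))),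
       ("non_standard_mixsft",        nsm ++ l.filter (fun it => pvKey it == (false, false, true)))] := by
  induction l generalizing so som sc scm ns nsm with
  | nil => simp [splitLoopA]
  | cons item rest ih =>
    simp only [splitLoopA]
    cases hs : (PySem.Dict.mk item).getD "is_standard" false <;>
    cases ho : (PySem.Dict.mk item).getD "is_opensource" false <;>
    cases hm : (PySem.Dict.mk item).getD "is_mixsft" false <;>
      simp [hs, ho, hm, ih, pvKey]

-- ===== VERDICT (by name: the statement is the Claim_ definition above) =====
theorem split_libero_plus_by_category_spec : Claim_equal_split_libero_plus_by_category := by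
  intro data_list _
  unfold Spec_split_libero_plus_by_category split_libero_plus_by_category split_libero_plus_by_category_alt
  simp [splitLoop_eq]
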